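-- pv_equiv track=rewrite | github.com/valenb02/primer-repo | ejercicios_parcial.py | max_cantidades_consecutivos
-- ===== SOURCE A (Python) =====
-- def max_cantidades_consecutivos(v: list[int]) -> dict[int, int]:
--     res = {}
--     for num in v:
--         if num not in res:
--             res[num] = 1
--
--     actual = v[0]
--     cant_apariciones_conse = 1
--
--     for i in range(1, len(v)):
--         if v[i] == actual:
--             cant_apariciones_conse += 1
--         else:
--             if cant_apariciones_conse > res[actual]:
--                 res[actual] = cant_apariciones_conse
--             actual = v[i]
--             cant_apariciones_conse = 1
--
--     if cant_apariciones_conse > res[actual]: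
--         res[actual] = cant_apariciones_conse
--
--     return res
-- ===== SOURCE B (Python) =====
-- def max_cantidades_consecutivos(v: list[int]) -> dict[int, int]:
--     runs = []
--     for x in v:
--         if runs and runs[-1][0] == x:
--             runs[-1] = (x, runs[-1][1] + 1)
--         else:
--             runs.append((x, 1))
--     res = {}
--     for x, k in runs:
--         if k > res.get(x, 0):
--             res[x] = k
--     return res
-- ===== Notes on version B (the rewrite author's own statement) =====
-- stated objective: simpler
-- what changed: Replaces A's prefill-every-key-with-1 pass plus an actual/counter run state machine by a two-phase pass: run-length-encode v into a list of value/length run pairs, then fold each run into the dict keeping the maximum length per value.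
-- outside the precondition, e.g. on max_cantidades_consecutivos([]): A raises IndexError, B returns {}
-- crash fix: On empty v, A raises IndexError (it indexes the first element) while B returns {}. — e.g. on max_cantidades_consecutivos([]): A raises IndexError, B returns []
import Mathlib
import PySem

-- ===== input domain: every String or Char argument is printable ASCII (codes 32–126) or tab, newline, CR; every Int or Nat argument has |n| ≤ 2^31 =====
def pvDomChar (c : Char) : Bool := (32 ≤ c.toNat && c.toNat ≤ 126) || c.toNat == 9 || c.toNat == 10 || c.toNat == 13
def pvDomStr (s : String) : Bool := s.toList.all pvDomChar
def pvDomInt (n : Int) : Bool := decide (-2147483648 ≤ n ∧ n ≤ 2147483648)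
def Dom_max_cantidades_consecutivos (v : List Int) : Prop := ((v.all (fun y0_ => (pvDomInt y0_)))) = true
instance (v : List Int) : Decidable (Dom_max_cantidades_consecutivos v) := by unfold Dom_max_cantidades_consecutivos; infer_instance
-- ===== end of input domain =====

-- B replaces A's prefill pass + actual/counter state machine by run-length encoding v and folding maxima; simpler, same cost.


-- ===== PORT A =====
-- literal transliteration of A: prefill res[num]=1 for unseen nums, then the range(1, len(v)) run state machine.
-- res[actual] is ported as getD 0: actual is always a key of res here (prefilled), so the default is never read.
def max_cantidades_consecutivos (v : List Int) : List (Int × Int) :=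
  let res : PySem.Dict Int Int :=
    v.foldl (fun res num => if res.contains num = false then res.insert num 1 else res) PySem.Dict.empty
  match PySem.List.pyGet? v 0 with
  | none => []   -- IndexError on empty v; excluded by Pre_
  | some a0 =>
    let st := (PySem.List.pyRange 1 (v.length : Int) 1).foldl
      (fun (st : Int × Int × PySem.Dict Int Int) i =>
        let vi := PySem.List.pyGetD v i 0
        if vi = st.1 then (st.1, st.2.1 + 1, st.2.2)
        else (vi, 1, if st.2.1 > st.2.2.getD st.1 0 then st.2.2.insert st.1 st.2.1 else st.2.2))
      (a0, (1 : Int), res)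
    (if st.2.1 > st.2.2.getD st.1 0 then st.2.2.insert st.1 st.2.1 else st.2.2).items

-- ===== PORT B =====
-- pass 1 of Source B: run-length encode v ('runs[-1]' read via getLast?, its in-place update as dropLast ++ [_])
def buildRuns (v : List Int) : List (Int × Int) :=
  v.foldl (fun runs x =>
    match runs.getLast? with
    | some (y, c) => if y = x then runs.dropLast ++ [(x, c + 1)] else runs ++ [(x, 1)]
    | none => runs ++ [(x, 1)]) []

-- pass 2 of Source B: fold each run into the dict with the running max
def max_cantidades_consecutivos_alt (v : List Int) : List (Int × Int) :=
  ((buildRuns v).foldl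
    (fun res p => if p.2 > res.getD p.1 0 then res.insert p.1 p.2 else res)
    (PySem.Dict.empty : PySem.Dict Int Int)).items

-- ===== PRECONDITION & SPEC =====
-- A indexes the first element: it raises IndexError exactly on the empty list.
def Pre_max_cantidades_consecutivos (v : List Int) : Prop := v ≠ []
instance (v : List Int) : Decidable (Pre_max_cantidades_consecutivos v) := by unfold Pre_max_cantidades_consecutivos; infer_instance

def pvWitness_max_cantidades_consecutivos : List Int := [1, 1, 2, 1]

-- On empty v, A raises IndexError (it indexes the first element) while B returns {}.
def Raises_max_cantidades_consecutivos (v : List Int) : Prop := v = []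
instance (v : List Int) : Decidable (Raises_max_cantidades_consecutivos v) := by unfold Raises_max_cantidades_consecutivos; infer_instance
def pvRaiseWitness_max_cantidades_consecutivos : List Int := []
def pvRaiseWitnessOut_max_cantidades_consecutivos : List (Int × Int) := []

def Spec_max_cantidades_consecutivos (v : List Int) (out : List (Int × Int)) : Prop := out = max_cantidades_consecutivos_alt v
instance (v : List Int) (out : List (Int × Int)) : Decidable (Spec_max_cantidades_consecutivos v out) := by unfold Spec_max_cantidades_consecutivos; infer_instance

-- ===== CLAIM (what is proved, stated in full; the proofs are below) =====
def Claim_equal_max_cantidades_consecutivos : Prop := ∀ (v : List Int), Dom_max_cantidades_consecutivos v → Pre_max_cantidades_consecutivos v → Spec_max_cantidades_consecutivos v (max_cantidades_consecutivos v)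

def Claim_raises_max_cantidades_consecutivos : Prop := (∀ (v : List Int), Dom_max_cantidades_consecutivos v → Raises_max_cantidades_consecutivos v → ¬ Pre_max_cantidades_consecutivos v) ∧ (Dom_max_cantidades_consecutivos (pvRaiseWitness_max_cantidades_consecutivos) ∧ Raises_max_cantidades_consecutivos (pvRaiseWitness_max_cantidades_consecutivos) ∧ max_cantidades_consecutivos_alt (pvRaiseWitness_max_cantidades_consecutivos) = pvRaiseWitnessOut_max_cantidades_consecutivos)

-- ===== LEMMAS AND PROOFS =====

-- shared vocabulary for the proofs
def flushD (res : PySem.Dict Int Int) (x k : Int) : PySem.Dict Int Int :=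
  if k > res.getD x 0 then res.insert x k else res

def ensD (res : PySem.Dict Int Int) (x : Int) : PySem.Dict Int Int :=
  if res.contains x = false then res.insert x 1 else res

def runsFold (rs : List (Int × Int)) (res : PySem.Dict Int Int) : PySem.Dict Int Int :=
  rs.foldl (fun res p => flushD res p.1 p.2) res

def ensFold (rs : List (Int × Int)) (res : PySem.Dict Int Int) : PySem.Dict Int Int :=
  rs.foldl (fun res p => ensD res p.1) res

-- (length of, remainder after) the maximal run of x at the head of the list
def bRun (x : Int) : List Int → Int × List Int
  | [] => (0, [])
  | y :: t => if y = x then ((bRun x t).1 + 1, (bRun x t).2) else (0, y :: t)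

theorem bRun_len (x : Int) (l : List Int) : (bRun x l).2.length ≤ l.length := by
  induction l with
  | nil => simp [bRun]
  | cons y t ih => simp only [bRun]; split <;> simp <;> omega

theorem bRun_nonneg (x : Int) (l : List Int) : 0 ≤ (bRun x l).1 := by
  induction l with
  | nil => simp [bRun]
  | cons y t ih => simp only [bRun]; split <;> simp <;> omega

def runsOf : List Int → List (Int × Int)
  | [] => []
  | x :: t => (x, (bRun x t).1 + 1) :: runsOf (bRun x t).2
termination_by l => l.length
decreasing_by simpa using Nat.lt_succ_of_le (bRun_len x t)

theorem runsOf_pos : ∀ (l : List Int), ∀ p ∈ runsOf l, 1 ≤ p.2 := by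
  intro l
  induction l using runsOf.induct with
  | case1 => simp [runsOf]
  | case2 x t ih =>
    intro p hp
    rw [runsOf] at hp
    rcases List.mem_cons.mp hp with h | h
    · subst h; have := bRun_nonneg x t; simpa using by omega
    · exact ih p h

def bStep (runs : List (Int × Int)) (x : Int) : List (Int × Int) :=
  match runs.getLast? with
  | some (y, c) => if y = x then runs.dropLast ++ [(x, c + 1)] else runs ++ [(x, 1)]
  | none => runs ++ [(x, 1)]

theorem build_aux (l : List Int) : ∀ (R : List (Int × Int)) (x c : Int),
    l.foldl bStep (R ++ [(x, c)]) = R ++ (x, (bRun x l).1 + c) :: runsOf (bRun x l).2 := by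
  induction l with
  | nil => intro R x c; simp [bRun, runsOf]
  | cons y t ih =>
    intro R x c
    simp only [List.foldl_cons]
    by_cases hxy : x = y
    · subst hxy
      have hstep : bStep (R ++ [(x, c)]) x = R ++ [(x, c + 1)] := by simp [bStep]
      rw [hstep, ih R x (c + 1)]
      have hbr : bRun x (x :: t) = ((bRun x t).1 + 1, (bRun x t).2) := by simp [bRun]
      rw [hbr]
      have h2 : (bRun x t).1 + 1 + c = (bRun x t).1 + (c + 1) := by ring
      rw [h2]
    · have hyx : ¬ y = x := fun h => hxy h.symm
      have hstep : bStep (R ++ [(x, c)]) y = (R ++ [(x, c)]) ++ [(y, 1)] := by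
        simp [bStep, hxy]
      rw [hstep, ih (R ++ [(x, c)]) y 1]
      have hbr : bRun x (y :: t) = (0, y :: t) := by simp [bRun, hyx]
      rw [hbr, runsOf]
      simp

-- pass 1 of B computes runsOf
theorem buildRuns_eq (v : List Int) : buildRuns v = runsOf v := by
  cases v with
  | nil => simp [buildRuns, runsOf]
  | cons x t =>
    show (x :: t).foldl bStep [] = runsOf (x :: t)
    have h0 : bStep [] x = [] ++ [(x, 1)] := by simp [bStep]
    simp only [List.foldl_cons, h0]
    rw [build_aux t [] x 1, runsOf]
    simp

theorem contains_ensD_self (d : PySem.Dict Int Int) (x : Int) : (ensD d x).contains x = true := by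
  unfold ensD
  split
  · simp [PySem.Dict.contains_insert]
  · rename_i h; simpa using h

theorem ensD_of_contains (d : PySem.Dict Int Int) (x : Int) (h : d.contains x = true) :
    ensD d x = d := by
  unfold ensD; simp [h]

-- the prefill loop skips over the elements of a run whose value is already a key
theorem prefill_run (t : List Int) : ∀ (x : Int) (d : PySem.Dict Int Int), d.contains x = true →
    t.foldl (fun res num => ensD res num) d = (bRun x t).2.foldl (fun res num => ensD res num) d := by
  induction t with
  | nil => intro x d _; simp [bRun]
  | cons y t ih =>
    intro x d hx
    by_cases hyx : y = x
    · subst hyx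
      have hbr : bRun y (y :: t) = ((bRun y t).1 + 1, (bRun y t).2) := by simp [bRun]
      rw [hbr]
      simp only [List.foldl_cons, ensD_of_contains d y hx]
      exact ih y d hx
    · have hbr : bRun x (y :: t) = (0, y :: t) := by simp [bRun, hyx]
      rw [hbr]

-- A's prefill loop keyed by runs
theorem prefill_eq (l : List Int) (d : PySem.Dict Int Int) :
    l.foldl (fun res num => if res.contains num = false then res.insert num 1 else res) d
      = ensFold (runsOf l) d := by
  have he : ∀ (l : List Int) (d : PySem.Dict Int Int),
      l.foldl (fun res num => if res.contains num = false then res.insert num 1 else res) d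
        = l.foldl (fun res num => ensD res num) d := by
    intro l d; rfl
  rw [he]
  induction l using runsOf.induct generalizing d with
  | case1 => simp [runsOf, ensFold]
  | case2 x t ih =>
    rw [runsOf]
    simp only [List.foldl_cons]
    rw [prefill_run t x (ensD d x) (contains_ensD_self d x)]
    rw [ih (ensD d x)]
    rfl

def aStep (st : Int × Int × PySem.Dict Int Int) (vi : Int) : Int × Int × PySem.Dict Int Int :=
  if vi = st.1 then (st.1, st.2.1 + 1, st.2.2) else (vi, 1, flushD st.2.2 st.1 st.2.1)

def aFin (st : Int × Int × PySem.Dict Int Int) : PySem.Dict Int Int := flushD st.2.2 st.1 st.2.1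

-- A's state machine keyed by runs
theorem aloop_eq (t : List Int) : ∀ (x c : Int) (res : PySem.Dict Int Int),
    aFin (t.foldl aStep (x, c, res))
      = runsFold ((x, (bRun x t).1 + c) :: runsOf (bRun x t).2) res := by
  induction t with
  | nil => intro x c res; simp [bRun, runsOf, aFin, runsFold]
  | cons y t ih =>
    intro x c res
    simp only [List.foldl_cons]
    by_cases hyx : y = x
    · subst hyx
      have hs : aStep (y, c, res) y = (y, c + 1, res) := by simp [aStep]
      rw [hs, ih y (c + 1) res]
      have hbr : bRun y (y :: t) = ((bRun y t).1 + 1, (bRun y t).2) := by simp [bRun]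
      rw [hbr]
      have h2 : (bRun y t).1 + 1 + c = (bRun y t).1 + (c + 1) := by ring
      rw [h2]
    · have hs : aStep (x, c, res) y = (y, 1, flushD res x c) := by simp [aStep, hyx]
      rw [hs, ih y 1 (flushD res x c)]
      have hbr : bRun x (y :: t) = (0, y :: t) := by simp [bRun, hyx]
      rw [hbr]
      rw [runsOf]
      simp only [runsFold, List.foldl_cons]
      norm_num

theorem getD_of_not_contains (d : PySem.Dict Int Int) (x : Int) (h : d.contains x = false) :
    d.getD x 0 = 0 := by
  have := (PySem.Dict.get?_eq_none_iff_contains d x).mpr h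
  simp [PySem.Dict.getD, this]

-- two inserts at distinct keys commute when x is already present
theorem insert_comm_present (d : PySem.Dict Int Int) (x y k : Int)
    (hx : d.contains x = true) (hy : d.contains y = false) :
    (d.insert y 1).insert x k = (d.insert x k).insert y 1 := by
  have hxy : x ≠ y := by intro h; subst h; simp [hx] at hy
  apply PySem.Dict.ext
  have h1 : (d.insert y 1).contains x = true := by
    simp [PySem.Dict.contains_insert, hx]
  have h2 : (d.insert x k).contains y = false := by
    simp [PySem.Dict.contains_insert, hy, Ne.symm hxy]
  rw [PySem.Dict.items_insert_of_contains _ _ h1,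
      PySem.Dict.items_insert_of_not_contains _ _ hy,
      PySem.Dict.items_insert_of_not_contains _ _ h2,
      PySem.Dict.items_insert_of_contains _ _ hx]
  simp [Ne.symm hxy]

theorem contains_flushD (d : PySem.Dict Int Int) (x k z : Int) (hx : d.contains x = true) :
    (flushD d x k).contains z = d.contains z := by
  unfold flushD
  split
  · by_cases hz : z = x
    · subst hz; simp [PySem.Dict.contains_insert, hx]
    · simp [PySem.Dict.contains_insert, hz]
  · rfl

-- flushing a present key commutes with ensuring any key
theorem flushD_ensD_comm (d : PySem.Dict Int Int) (x y k : Int)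
    (hx : d.contains x = true) : flushD (ensD d y) x k = ensD (flushD d x k) y := by
  by_cases hy : d.contains y = true
  · rw [ensD_of_contains d y hy]
    rw [ensD_of_contains _ y (by rw [contains_flushD d x k y hx]; exact hy)]
  · have hy' : d.contains y = false := by simpa using hy
    have hxy : ¬ (x = y) := by intro h; subst h; simp [hx] at hy'
    have heny : ensD d y = d.insert y 1 := by unfold ensD; simp [hy']
    have heny' : ensD (flushD d x k) y = (flushD d x k).insert y 1 := by
      unfold ensD; rw [contains_flushD d x k y hx, hy']; simp
    rw [heny, heny']
    unfold flushD
    rw [PySem.Dict.getD_insert, if_neg hxy]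
    split
    · exact insert_comm_present d x y k hx hy'
    · rfl

theorem contains_ensD_mono (d : PySem.Dict Int Int) (x y : Int) (hx : d.contains x = true) :
    (ensD d y).contains x = true := by
  unfold ensD
  split
  · rw [PySem.Dict.contains_insert]; simp [hx]
  · exact hx

theorem ensFold_cons (p : Int × Int) (rs : List (Int × Int)) (d : PySem.Dict Int Int) :
    ensFold (p :: rs) d = ensFold rs (ensD d p.1) := rfl

theorem runsFold_cons (p : Int × Int) (rs : List (Int × Int)) (d : PySem.Dict Int Int) :
    runsFold (p :: rs) d = runsFold rs (flushD d p.1 p.2) := rfl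

theorem flushD_ensFold_comm (rs : List (Int × Int)) : ∀ (d : PySem.Dict Int Int) (x k : Int),
    d.contains x = true → flushD (ensFold rs d) x k = ensFold rs (flushD d x k) := by
  induction rs with
  | nil => intro d x k _; rfl
  | cons p rs ih =>
    intro d x k hx
    rw [ensFold_cons, ensFold_cons]
    rw [ih (ensD d p.1) x k (contains_ensD_mono d x p.1 hx)]
    rw [flushD_ensD_comm d x p.1 k hx]

-- flushing the key just ensured equals flushing it in the original dict (run length ≥ 1)
theorem flushD_ensD_self (d : PySem.Dict Int Int) (x k : Int) (hk : 1 ≤ k) :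
    flushD (ensD d x) x k = flushD d x k := by
  by_cases hx : d.contains x = true
  · rw [ensD_of_contains d x hx]
  · have hx' : d.contains x = false := by simpa using hx
    have hen : ensD d x = d.insert x 1 := by unfold ensD; simp [hx']
    rw [hen]
    unfold flushD
    rw [PySem.Dict.getD_insert_self, getD_of_not_contains d x hx']
    by_cases h1 : k > 1
    · rw [if_pos h1, if_pos (by omega), PySem.Dict.insert_insert_self]
    · have hk1 : k = 1 := by omega
      subst hk1
      simp

-- the prefilled entries do not change the folded maxima
theorem main_lemma (rs : List (Int × Int)) : ∀ (d : PySem.Dict Int Int),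
    (∀ p ∈ rs, 1 ≤ p.2) → runsFold rs (ensFold rs d) = runsFold rs d := by
  induction rs with
  | nil => intro d _; rfl
  | cons p rs ih =>
    intro d h
    rw [ensFold_cons, runsFold_cons, runsFold_cons]
    rw [flushD_ensFold_comm rs (ensD d p.1) p.1 p.2 (contains_ensD_self d p.1)]
    rw [flushD_ensD_self d p.1 p.2 (h p (List.mem_cons_self))]
    exact ih (flushD d p.1 p.2) (fun q hq => h q (List.mem_cons_of_mem p hq))

-- port B is the max-fold over the runs
theorem altB_eq (v : List Int) :
    max_cantidades_consecutivos_alt v = (runsFold (runsOf v) PySem.Dict.empty).items := by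
  show (runsFold (buildRuns v) PySem.Dict.empty).items = _
  rw [buildRuns_eq]

-- port A on a nonempty list, with its pieces named
theorem portA_cons (a0 : Int) (t : List Int) :
    max_cantidades_consecutivos (a0 :: t)
      = (aFin (t.foldl aStep (a0, 1, ensFold (runsOf (a0 :: t)) PySem.Dict.empty))).items := by
  have hget : PySem.List.pyGet? (a0 :: t) 0 = some a0 := by
    simp [PySem.List.pyGet?, PySem.List.pyIdx?]
  have hfun : (fun (st : Int × Int × PySem.Dict Int Int) i =>
      let vi := PySem.List.pyGetD (a0 :: t) i 0
      if vi = st.1 then (st.1, st.2.1 + 1, st.2.2)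
      else (vi, 1, if st.2.1 > st.2.2.getD st.1 0 then st.2.2.insert st.1 st.2.1 else st.2.2))
      = (fun (st : Int × Int × PySem.Dict Int Int) i => aStep st (PySem.List.pyGetD (a0 :: t) i 0)) := rfl
  simp only [max_cantidades_consecutivos, hget, hfun]
  rw [PySem.List.foldl_pyRange_pyGetD' (a0 :: t) 0 aStep _ (by norm_num : (0:Int) ≤ 1)]
  rw [prefill_eq]
  rfl

-- ===== VERDICT (by name: the statement is the Claim_ definition above) =====
theorem max_cantidades_consecutivos_spec : Claim_equal_max_cantidades_consecutivos := by
  unfold Claim_equal_max_cantidades_consecutivos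
  intro v _ hpre
  unfold Spec_max_cantidades_consecutivos
  cases v with
  | nil => exact absurd rfl hpre
  | cons a0 t =>
    rw [portA_cons, aloop_eq t a0 1, altB_eq]
    have hruns : (a0, (bRun a0 t).1 + 1) :: runsOf (bRun a0 t).2 = runsOf (a0 :: t) := by
      rw [runsOf]
    rw [hruns]
    rw [main_lemma (runsOf (a0 :: t)) PySem.Dict.empty (runsOf_pos (a0 :: t))]

@[simp]
theorem max_cantidades_consecutivos_raises : Claim_raises_max_cantidades_consecutivos := by
  unfold Claim_raises_max_cantidades_consecutivos
  exact ⟨fun v _ hr hp => hp hr, by decide⟩
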